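-- pv_equiv track=rewrite | github.com/verisimilitude20201/competitive-programming | CTCD/Bit_Manipulations/flip_bits_to_get_max_sequence_of_1s.py | flip_bit
-- ===== SOURCE A (Python) =====
-- def flip_bit(num):
--     if ~num == 0:
--         return 64
--     prev_length = 0
--     curr_length = 0
--     max_length = 1
--     while num > 0:
--         if (num & 1) == 1:
--             curr_length += 1
--         elif (num & 1) == 0:
--             prev_length = curr_length if ((num & 2) != 0) else 0
--             curr_length = 0
--         max_length = max(max_length, prev_length + curr_length + 1)
--         num >>= 1
--
--     return max_length
-- ===== SOURCE B (Python) =====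
-- def flip_bit(num):
--     if ~num == 0:
--         return 64
--     if num <= 0:
--         return 1
--     # run-length encode the bits LSB-first: (zero_gap_below, ones_run_length) blocks
--     runs = []
--     n = num
--     while n > 0:
--         z = 0
--         while n & 1 == 0:
--             n >>= 1
--             z += 1
--         o = 0
--         while n & 1 == 1:
--             n >>= 1
--             o += 1
--         runs.append((z, o))
--     best = 1
--     prev = 0
--     for z, o in runs:
--         if z == 1:
--             best = max(best, o + 1, prev + o + 1)
--         else:
--             best = max(best, o + 1)
--         prev = o
--     return best
-- ===== Notes on version B (the rewrite author's own statement) =====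
-- stated objective: alternative
-- what changed: Replaces A's bit-by-bit state machine with lookahead (prev/curr run lengths updated per bit) by a run-length encoding of the binary representation followed by a single fold over the run list, merging adjacent runs of set bits exactly when the gap between them is a single zero bit.
import Mathlib
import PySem

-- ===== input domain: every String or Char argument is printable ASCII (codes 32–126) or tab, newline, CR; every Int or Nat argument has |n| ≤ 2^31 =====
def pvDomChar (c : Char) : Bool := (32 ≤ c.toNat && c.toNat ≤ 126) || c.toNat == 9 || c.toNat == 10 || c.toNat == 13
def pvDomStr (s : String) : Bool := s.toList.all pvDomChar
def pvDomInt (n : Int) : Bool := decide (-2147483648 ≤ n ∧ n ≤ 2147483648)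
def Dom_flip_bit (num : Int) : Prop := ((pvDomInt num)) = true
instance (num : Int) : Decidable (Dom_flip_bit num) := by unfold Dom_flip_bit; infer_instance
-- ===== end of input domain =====

-- B is an alternative, not faster: run-length encode the binary representation, then one fold merging 1-runs across single-zero gaps; return-value equivalence with A's per-bit state machine is proved for all ints.

-- ===== PORT A =====
-- A's while loop; inside the loop num > 0, so `num & 1` = num % 2, `num & 2 != 0` = (num / 2) % 2 = 1 and
-- `num >>= 1` = num / 2 (Lean's Euclidean / and % on Int agree with Python's floor versions for positive num).
-- The Nat fuel only makes the loop total; `num.toNat + 1` ≥ the iteration count (= bit length of num), so it never runs out.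
def flipLoop : Nat → Int → Int → Int → Int → Int
  | 0, _, _, _, m => m
  | fuel + 1, num, p, c, m =>
    if 0 < num then
      if num % 2 = 1 then
        flipLoop fuel (num / 2) p (c + 1) (max m (p + (c + 1) + 1))
      else
        let p' := if num / 2 % 2 = 1 then c else 0
        flipLoop fuel (num / 2) p' 0 (max m (p' + 0 + 1))
    else m

def flip_bit (num : Int) : Int :=
  if (-num - 1) = 0 then 64   -- ~num == 0
  else flipLoop (num.toNat + 1) num 0 0 1

-- ===== PORT B =====
-- inner `while n & 1 == 0` loop (n stays > 0 while it runs); returns (z, n'); fuel is a totality guard only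
def stripZerosGo : Nat → Int → Int × Int
  | 0, n => (0, n)
  | fuel + 1, n =>
    if 0 < n ∧ n % 2 = 0 then
      ((stripZerosGo fuel (n / 2)).1 + 1, (stripZerosGo fuel (n / 2)).2)
    else (0, n)

def stripZeros (n : Int) : Int × Int := stripZerosGo (n.toNat + 1) n

-- inner `while n & 1 == 1` loop; returns (o, n')
def stripOnesGo : Nat → Int → Int × Int
  | 0, n => (0, n)
  | fuel + 1, n =>
    if 0 < n ∧ n % 2 = 1 then
      ((stripOnesGo fuel (n / 2)).1 + 1, (stripOnesGo fuel (n / 2)).2)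
    else (0, n)

def stripOnes (n : Int) : Int × Int := stripOnesGo (n.toNat + 1) n

-- outer `while n > 0` loop building `runs`
def collectRuns : Nat → Int → List (Int × Int)
  | 0, _ => []
  | fuel + 1, n =>
    if 0 < n then
      ((stripZeros n).1, (stripOnes (stripZeros n).2).1)
        :: collectRuns fuel (stripOnes (stripZeros n).2).2
    else []

-- B's final `for z, o in runs` fold with accumulators (prev, best)
def bestFold : List (Int × Int) → Int → Int → Int
  | [], _, best => best
  | (z, o) :: rest, prev, best =>
      bestFold rest o (if z = 1 then max (max best (o + 1)) (prev + o + 1) else max best (o + 1))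

def flip_bit_alt (num : Int) : Int :=
  if (-num - 1) = 0 then 64   -- ~num == 0
  else if num ≤ 0 then 1
  else bestFold (collectRuns (num.toNat + 1) num) 0 1

-- ===== PRECONDITION & SPEC =====
def Spec_flip_bit (num : Int) (out : Int) : Prop := out = flip_bit_alt num
instance (num : Int) (out : Int) : Decidable (Spec_flip_bit num out) := by unfold Spec_flip_bit; infer_instance

-- ===== CLAIM (what is proved, stated in full; the proofs are below) =====
def Claim_equal_flip_bit : Prop := ∀ (num : Int), Dom_flip_bit num → Spec_flip_bit num (flip_bit num)

-- ===== LEMMAS AND PROOFS =====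

theorem max_absorb_int (m a b : Int) (h : a ≤ b) : max (max m a) b = max m b := by
  rw [max_assoc, max_eq_right h]

-- fuel irrelevance: any sufficient fuel computes the same value
theorem stripZerosGo_irrel (f1 : Nat) : ∀ (f2 : Nat) (n : Int), n.toNat < f1 → n.toNat < f2 →
    stripZerosGo f1 n = stripZerosGo f2 n := by
  induction f1 with
  | zero => intro f2 n h1 _; omega
  | succ f1 ih =>
    intro f2 n h1 h2
    obtain ⟨f2, rfl⟩ : ∃ k, f2 = k + 1 := ⟨f2 - 1, by omega⟩
    by_cases hg : 0 < n ∧ n % 2 = 0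
    · simp only [stripZerosGo, if_pos hg]
      rw [ih f2 (n / 2) (by omega) (by omega)]
    · simp only [stripZerosGo, if_neg hg]

theorem stripOnesGo_irrel (f1 : Nat) : ∀ (f2 : Nat) (n : Int), n.toNat < f1 → n.toNat < f2 →
    stripOnesGo f1 n = stripOnesGo f2 n := by
  induction f1 with
  | zero => intro f2 n h1 _; omega
  | succ f1 ih =>
    intro f2 n h1 h2
    obtain ⟨f2, rfl⟩ : ∃ k, f2 = k + 1 := ⟨f2 - 1, by omega⟩
    by_cases hg : 0 < n ∧ n % 2 = 1
    · simp only [stripOnesGo, if_pos hg]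
      rw [ih f2 (n / 2) (by omega) (by omega)]
    · simp only [stripOnesGo, if_neg hg]

-- one-step unfolding of the fuel-free wrappers
theorem stripZeros_pos_eq (n : Int) (h : 0 < n) (he : n % 2 = 0) :
    (stripZeros n).1 = (stripZeros (n / 2)).1 + 1 ∧ (stripZeros n).2 = (stripZeros (n / 2)).2 := by
  obtain ⟨t, ht⟩ : ∃ t, n.toNat = t + 1 := ⟨n.toNat - 1, by omega⟩
  have key : stripZeros n = ((stripZeros (n / 2)).1 + 1, (stripZeros (n / 2)).2) := by
    unfold stripZeros
    rw [ht]
    rw [show stripZerosGo (t + 1 + 1) n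
        = if 0 < n ∧ n % 2 = 0 then
            ((stripZerosGo (t + 1) (n / 2)).1 + 1, (stripZerosGo (t + 1) (n / 2)).2)
          else (0, n) from rfl]
    rw [if_pos (⟨h, he⟩ : 0 < n ∧ n % 2 = 0)]
    rw [stripZerosGo_irrel (t + 1) ((n / 2).toNat + 1) (n / 2) (by omega) (by omega)]
  rw [key]
  exact ⟨rfl, rfl⟩

theorem stripZeros_neg_eq (n : Int) (h : ¬(0 < n ∧ n % 2 = 0)) :
    (stripZeros n).1 = 0 ∧ (stripZeros n).2 = n := by
  unfold stripZeros
  rw [show stripZerosGo (n.toNat + 1) n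
      = if 0 < n ∧ n % 2 = 0 then
          ((stripZerosGo n.toNat (n / 2)).1 + 1, (stripZerosGo n.toNat (n / 2)).2)
        else (0, n) from rfl]
  rw [if_neg h]
  exact ⟨rfl, rfl⟩

theorem stripOnes_pos_eq (n : Int) (h : 0 < n) (ho : n % 2 = 1) :
    (stripOnes n).1 = (stripOnes (n / 2)).1 + 1 ∧ (stripOnes n).2 = (stripOnes (n / 2)).2 := by
  obtain ⟨t, ht⟩ : ∃ t, n.toNat = t + 1 := ⟨n.toNat - 1, by omega⟩
  have key : stripOnes n = ((stripOnes (n / 2)).1 + 1, (stripOnes (n / 2)).2) := by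
    unfold stripOnes
    rw [ht]
    rw [show stripOnesGo (t + 1 + 1) n
        = if 0 < n ∧ n % 2 = 1 then
            ((stripOnesGo (t + 1) (n / 2)).1 + 1, (stripOnesGo (t + 1) (n / 2)).2)
          else (0, n) from rfl]
    rw [if_pos (⟨h, ho⟩ : 0 < n ∧ n % 2 = 1)]
    rw [stripOnesGo_irrel (t + 1) ((n / 2).toNat + 1) (n / 2) (by omega) (by omega)]
  rw [key]
  exact ⟨rfl, rfl⟩

theorem stripOnes_neg_eq (n : Int) (h : ¬(0 < n ∧ n % 2 = 1)) :
    (stripOnes n).1 = 0 ∧ (stripOnes n).2 = n := by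
  unfold stripOnes
  rw [show stripOnesGo (n.toNat + 1) n
      = if 0 < n ∧ n % 2 = 1 then
          ((stripOnesGo n.toNat (n / 2)).1 + 1, (stripOnesGo n.toNat (n / 2)).2)
        else (0, n) from rfl]
  rw [if_neg h]
  exact ⟨rfl, rfl⟩

-- arithmetic facts about the strip loops, by bounded induction on n.toNat
theorem stripZeros_facts (k : Nat) : ∀ n : Int, n.toNat ≤ k → 0 < n →
    0 < (stripZeros n).2 ∧ (stripZeros n).2 % 2 = 1 ∧ (stripZeros n).2 ≤ n ∧ 0 ≤ (stripZeros n).1 := by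
  induction k with
  | zero => intro n hk hp; omega
  | succ k ih =>
    intro n hk hp
    by_cases hg : 0 < n ∧ n % 2 = 0
    · have e := stripZeros_pos_eq n hg.1 hg.2
      have := ih (n / 2) (by omega) (by omega)
      omega
    · have e := stripZeros_neg_eq n hg
      omega

theorem stripOnes_facts (k : Nat) : ∀ n : Int, n.toNat ≤ k → 0 < n → n % 2 = 1 →
    (stripOnes n).2 < n ∧ 0 ≤ (stripOnes n).2 ∧ (stripOnes n).2 % 2 = 0 ∧ 0 ≤ (stripOnes n).1 := by
  induction k with
  | zero => intro n hk hp; omega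
  | succ k ih =>
    intro n hk hp ho
    have e := stripOnes_pos_eq n hp ho
    by_cases hg : 0 < n / 2 ∧ n / 2 % 2 = 1
    · have := ih (n / 2) (by omega) hg.1 hg.2
      omega
    · have e2 := stripOnes_neg_eq (n / 2) hg
      omega

theorem stripOnes_fst_nonneg (n : Int) : 0 ≤ (stripOnes n).1 := by
  by_cases hg : 0 < n ∧ n % 2 = 1
  · exact (stripOnes_facts n.toNat n le_rfl hg.1 hg.2).2.2.2
  · have := stripOnes_neg_eq n hg
    omega

theorem stripZeros_fst_pos (n : Int) (h : 0 < n) (he : n % 2 = 0) : 1 ≤ (stripZeros n).1 := by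
  have e := stripZeros_pos_eq n h he
  have h2 : 0 ≤ (stripZeros (n / 2)).1 := by
    by_cases hg : 0 < n / 2
    · exact (stripZeros_facts (n / 2).toNat (n / 2) le_rfl hg).2.2.2
    · have := stripZeros_neg_eq (n / 2) (by omega)
      omega
  omega

-- fuel irrelevance for A's loop, and its canonical fuel-free reading FL
theorem flipLoop_irrel (f1 : Nat) : ∀ (f2 : Nat) (n : Int), n.toNat < f1 → n.toNat < f2 →
    ∀ p c m, flipLoop f1 n p c m = flipLoop f2 n p c m := by
  induction f1 with
  | zero => intro f2 n h1 _; omega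
  | succ f1 ih =>
    intro f2 n h1 h2 p c m
    obtain ⟨f2, rfl⟩ : ∃ k, f2 = k + 1 := ⟨f2 - 1, by omega⟩
    by_cases hp : 0 < n
    · simp only [flipLoop, if_pos hp]
      by_cases ho : n % 2 = 1
      · rw [if_pos ho, if_pos ho, ih f2 (n / 2) (by omega) (by omega)]
      · rw [if_neg ho, if_neg ho]
        exact ih f2 (n / 2) (by omega) (by omega) _ _ _
    · simp only [flipLoop, if_neg hp]

def FL (n p c m : Int) : Int := flipLoop (n.toNat + 1) n p c m

theorem FL_stop (n p c m : Int) (h : ¬0 < n) : FL n p c m = m := by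
  unfold FL
  simp only [flipLoop, if_neg h]

theorem FL_step_one (n p c m : Int) (h : 0 < n) (ho : n % 2 = 1) :
    FL n p c m = FL (n / 2) p (c + 1) (max m (p + (c + 1) + 1)) := by
  unfold FL
  conv_lhs => rw [show n.toNat + 1 = n.toNat + 1 by rfl]
  rw [show flipLoop (n.toNat + 1) n p c m
      = if 0 < n then
          if n % 2 = 1 then flipLoop n.toNat (n / 2) p (c + 1) (max m (p + (c + 1) + 1))
          else flipLoop n.toNat (n / 2) (if n / 2 % 2 = 1 then c else 0) 0
            (max m ((if n / 2 % 2 = 1 then c else 0) + 0 + 1))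
        else m from rfl]
  rw [if_pos h, if_pos ho]
  exact flipLoop_irrel n.toNat ((n / 2).toNat + 1) (n / 2) (by omega) (by omega) _ _ _

theorem FL_step_zero (n p c m : Int) (h : 0 < n) (he : n % 2 = 0) :
    FL n p c m = FL (n / 2) (if n / 2 % 2 = 1 then c else 0) 0
      (max m ((if n / 2 % 2 = 1 then c else 0) + 0 + 1)) := by
  unfold FL
  rw [show flipLoop (n.toNat + 1) n p c m
      = if 0 < n then
          if n % 2 = 1 then flipLoop n.toNat (n / 2) p (c + 1) (max m (p + (c + 1) + 1))
          else flipLoop n.toNat (n / 2) (if n / 2 % 2 = 1 then c else 0) 0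
            (max m ((if n / 2 % 2 = 1 then c else 0) + 0 + 1))
        else m from rfl]
  rw [if_pos h, if_neg (by omega)]
  exact flipLoop_irrel n.toNat ((n / 2).toNat + 1) (n / 2) (by omega) (by omega) _ _ _

-- A's loop consumes a maximal run of 1-bits in one step
theorem ones_lemma (k : Nat) : ∀ n : Int, n.toNat ≤ k → 0 < n → n % 2 = 1 →
    ∀ p c m, FL n p c m =
      FL (stripOnes n).2 p (c + (stripOnes n).1)
        (max m (p + c + (stripOnes n).1 + 1)) := by
  induction k with
  | zero => intro n hk hp; omega
  | succ k ih =>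
    intro n hk hp ho p c m
    obtain ⟨e1, e2⟩ := stripOnes_pos_eq n hp ho
    rw [FL_step_one n p c m hp ho, e1, e2]
    by_cases hg : 0 < n / 2 ∧ n / 2 % 2 = 1
    · rw [ih (n / 2) (by omega) hg.1 hg.2 p (c + 1) (max m (p + (c + 1) + 1))]
      have hnn := stripOnes_fst_nonneg (n / 2)
      have ec : c + 1 + (stripOnes (n / 2)).1 = c + ((stripOnes (n / 2)).1 + 1) := by omega
      have em : max (max m (p + (c + 1) + 1)) (p + (c + 1) + (stripOnes (n / 2)).1 + 1)
          = max m (p + c + ((stripOnes (n / 2)).1 + 1) + 1) := by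
        rw [max_absorb_int _ _ _ (by omega)]
        congr 1
        omega
      rw [ec, em]
    · obtain ⟨f1, f2⟩ := stripOnes_neg_eq (n / 2) hg
      rw [f1, f2]
      have ec : c + 1 = c + (0 + 1) := by omega
      have em : p + (c + 1) + 1 = p + c + (0 + 1) + 1 := by omega
      rw [em, ← ec]

-- A's loop consumes a maximal run of 0-bits in one step
theorem zeros_lemma (k : Nat) : ∀ n : Int, n.toNat ≤ k → 0 < n → n % 2 = 0 →
    ∀ p c m, FL n p c m =
      FL (stripZeros n).2 (if (stripZeros n).1 = 1 then c else 0) 0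
        (if (stripZeros n).1 = 1 then max m (c + 1) else max m 1) := by
  induction k with
  | zero => intro n hk hp; omega
  | succ k ih =>
    intro n hk hp he p c m
    obtain ⟨e1, e2⟩ := stripZeros_pos_eq n hp he
    rw [FL_step_zero n p c m hp he, e1, e2]
    have hp2 : 0 < n / 2 := by omega
    by_cases hodd : n / 2 % 2 = 1
    · -- a single zero: the next bit is 1, the loop sets prev := curr
      obtain ⟨f1, f2⟩ := stripZeros_neg_eq (n / 2) (by omega)
      rw [f1, f2]
      simp only [if_pos hodd]
      norm_num
    · have heven : n / 2 % 2 = 0 := by omega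
      simp only [if_neg hodd]
      rw [ih (n / 2) (by omega) hp2 heven]
      have hz1 := stripZeros_fst_pos (n / 2) hp2 heven
      have g1 : (if (stripZeros (n / 2)).1 = 1 then (0 : Int) else 0) = 0 := by
        split_ifs <;> rfl
      have g2 : (if (stripZeros (n / 2)).1 = 1 then max (max m (0 + 0 + 1)) (0 + 1)
          else max (max m (0 + 0 + 1)) 1) = max m 1 := by
        split_ifs <;> simp
      rw [g1, g2, if_neg (show ¬((stripZeros (n / 2)).1 + 1 = 1) by omega),
          if_neg (show ¬((stripZeros (n / 2)).1 + 1 = 1) by omega)]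

-- the abstract effect of A's loop on one run block, expressed over the run list
def G : List (Int × Int) → Int → Int → Int
  | [], _, m => m
  | (z, o) :: rest, c, m =>
      G rest o (max (if z = 1 then max m (c + 1) else max m 1) ((if z = 1 then c else 0) + o + 1))

-- sufficient fuel makes collectRuns fuel-independent at the entry point we use
theorem collectRuns_irrel (f1 : Nat) : ∀ (f2 : Nat) (n : Int), n.toNat < f1 → n.toNat < f2 →
    collectRuns f1 n = collectRuns f2 n := by
  induction f1 with
  | zero => intro f2 n h1 _; omega
  | succ f1 ih =>
    intro f2 n h1 h2
    obtain ⟨f2, rfl⟩ : ∃ k, f2 = k + 1 := ⟨f2 - 1, by omega⟩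
    by_cases hp : 0 < n
    · simp only [collectRuns, if_pos hp]
      have hz := stripZeros_facts n.toNat n le_rfl hp
      have ho := stripOnes_facts (stripZeros n).2.toNat (stripZeros n).2 le_rfl hz.1 hz.2.1
      rw [ih f2 (stripOnes (stripZeros n).2).2 (by omega) (by omega)]
    · simp only [collectRuns, if_neg hp]

def CR (n : Int) : List (Int × Int) := collectRuns (n.toNat + 1) n

theorem CR_stop (n : Int) (h : ¬0 < n) : CR n = [] := by
  unfold CR
  simp only [collectRuns, if_neg h]

theorem CR_step (n : Int) (h : 0 < n) :
    CR n = ((stripZeros n).1, (stripOnes (stripZeros n).2).1)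
      :: CR (stripOnes (stripZeros n).2).2 := by
  unfold CR
  rw [show collectRuns (n.toNat + 1) n
      = if 0 < n then
          ((stripZeros n).1, (stripOnes (stripZeros n).2).1)
            :: collectRuns n.toNat (stripOnes (stripZeros n).2).2
        else [] from rfl]
  rw [if_pos h]
  have hz := stripZeros_facts n.toNat n le_rfl h
  have ho := stripOnes_facts (stripZeros n).2.toNat (stripZeros n).2 le_rfl hz.1 hz.2.1
  rw [collectRuns_irrel n.toNat ((stripOnes (stripZeros n).2).2.toNat + 1) _ (by omega) (by omega)]

-- A's whole loop equals G over the run decomposition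
theorem main_lemma (k : Nat) : ∀ n : Int, n.toNat ≤ k → 0 < n →
    ∀ p c m, (n % 2 = 1 → p = 0 ∧ c = 0) →
      FL n p c m = G (CR n) c m := by
  induction k with
  | zero => intro n hk hp; omega
  | succ k ih =>
    intro n hk hpos p c m hcond
    rw [CR_step n hpos]
    have hz := stripZeros_facts n.toNat n le_rfl hpos
    have ho := stripOnes_facts (stripZeros n).2.toNat (stripZeros n).2 le_rfl hz.1 hz.2.1
    have honn := stripOnes_fst_nonneg (stripZeros n).2
    by_cases hodd : n % 2 = 1
    · -- head starts with a 1-run: stripZeros is the identity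
      obtain ⟨hp0, hc0⟩ := hcond hodd
      obtain ⟨f1, f2⟩ := stripZeros_neg_eq n (by omega)
      subst hp0 hc0
      rw [f1, f2]
      rw [f2] at ho honn
      rw [ones_lemma n.toNat n le_rfl hpos hodd 0 0 m]
      simp only [G]
      rw [if_neg (by omega), if_neg (by omega)]
      simp only [zero_add]
      rw [max_absorb_int _ _ _ (show (1 : Int) ≤ (stripOnes n).1 + 1 by omega)]
      by_cases hpos2 : 0 < (stripOnes n).2
      · refine ih (stripOnes n).2 (by omega) hpos2 _ _ _ ?_
        intro hh
        omega
      · rw [FL_stop _ _ _ _ (by omega), CR_stop _ (by omega)]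
        simp only [G]
    · -- head starts with a 0-run
      have heven : n % 2 = 0 := by omega
      rw [zeros_lemma n.toNat n le_rfl hpos heven p c m]
      rw [ones_lemma (stripZeros n).2.toNat (stripZeros n).2 le_rfl hz.1 hz.2.1]
      simp only [G, zero_add, add_zero]
      by_cases hpos2 : 0 < (stripOnes (stripZeros n).2).2
      · refine ih (stripOnes (stripZeros n).2).2 (by omega) hpos2 _ _ _ ?_
        intro hh
        omega
      · rw [FL_stop _ _ _ _ (by omega), CR_stop _ (by omega)]
        simp only [G]

theorem CR_snd_nonneg (k : Nat) : ∀ n : Int, n.toNat ≤ k → ∀ p ∈ CR n, 0 ≤ p.2 := by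
  induction k with
  | zero =>
    intro n hk p hp
    by_cases h : 0 < n
    · omega
    · rw [CR_stop n h] at hp
      exact absurd hp (List.not_mem_nil)
  | succ k ih =>
    intro n hk p hp
    by_cases h : 0 < n
    · rw [CR_step n h] at hp
      have hz := stripZeros_facts n.toNat n le_rfl h
      have ho := stripOnes_facts (stripZeros n).2.toNat (stripZeros n).2 le_rfl hz.1 hz.2.1
      rcases List.mem_cons.1 hp with h' | h'
      · subst h'
        exact stripOnes_fst_nonneg (stripZeros n).2
      · exact ih (stripOnes (stripZeros n).2).2 (by omega) p h'
    · rw [CR_stop n h] at hp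
      exact absurd hp (List.not_mem_nil)

-- G equals B's fold when the carried previous-run length is nonnegative
theorem G_eq_bestFold (rs : List (Int × Int)) :
    ∀ c m, 0 ≤ c → (∀ p ∈ rs, 0 ≤ p.2) → G rs c m = bestFold rs c m := by
  induction rs with
  | nil => intro c m _ _; rfl
  | cons hd tl ih =>
    intro c m hc hall
    obtain ⟨z, o⟩ := hd
    have ho : 0 ≤ o := hall (z, o) List.mem_cons_self
    simp only [G, bestFold]
    have hacc : max (if z = 1 then max m (c + 1) else max m 1) ((if z = 1 then c else 0) + o + 1)
        = (if z = 1 then max (max m (o + 1)) (c + o + 1) else max m (o + 1)) := by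
      split_ifs with h
      · rw [max_absorb_int _ _ _ (by omega)]
        rw [← max_absorb_int m (o + 1) (c + o + 1) (by omega)]
      · rw [max_absorb_int _ _ _ (by omega)]
        norm_num
    rw [hacc]
    exact ih o _ ho (fun p hp => hall p (List.mem_cons_of_mem _ hp))

-- ===== VERDICT (by name: the statement is the Claim_ definition above) =====
theorem flip_bit_spec : Claim_equal_flip_bit := by
  intro num _
  unfold Spec_flip_bit flip_bit flip_bit_alt
  by_cases h1 : (-num - 1) = 0
  · rw [if_pos h1, if_pos h1]
  · rw [if_neg h1, if_neg h1]
    by_cases h2 : num ≤ 0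
    · rw [if_pos h2]
      show flipLoop (num.toNat + 1) num 0 0 1 = 1
      have := FL_stop num 0 0 1 (by omega)
      exact this
    · rw [if_neg h2]
      show flipLoop (num.toNat + 1) num 0 0 1 = bestFold (collectRuns (num.toNat + 1) num) 0 1
      have h3 : FL num 0 0 1 = G (CR num) 0 1 :=
        main_lemma num.toNat num le_rfl (by omega) 0 0 1 (by intro _; exact ⟨rfl, rfl⟩)
      have h4 : G (CR num) 0 1 = bestFold (CR num) 0 1 :=
        G_eq_bestFold (CR num) 0 1 le_rfl (CR_snd_nonneg num.toNat num le_rfl)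
      exact h3.trans h4
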